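-- pv_equiv track=rewrite | github.com/shubhamsawant0601/HackerRank_and_LeetCode_Problems | Python/Strings/The Time in Words.py | timeInWords
-- ===== SOURCE A (Python) =====
-- def timeInWords(h, m):
--
--     num = ["zero", "one", "two","three", "four", "five","six", "seven", "eight", "nine", "ten", "eleven", "twelve", "thirteen", "fourteen", "quarter", "sixteen", "seventeen", "eighteen", "nineteen", "twenty"]
--
--     twenty = ["twenty "+num[i] for i in range(1,10,1)]
--
--     num = num + twenty
--
--     if m==0:
--         return str(num[h]+ " o' clock")
--
--     if m==1 :
--         return str(num[m]+" minute past "+num[h])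
--
--     if m==30:
--         return str("half past "+num[h])
--
--     if m==15:
--         return str("quarter past "+num[h])
--
--     if m==45:
--         return str("quarter to "+num[h+1])
--
--     if m<30 :
--         return str(num[m]+" minutes past "+num[h])
--
--     if m>30 :
--         return str(num[60-m]+" minutes to "+ num[h+1])
-- ===== SOURCE B (Python) =====
-- def timeInWords(h, m):
--     words = ["zero", "one", "two", "three", "four", "five", "six", "seven",
--              "eight", "nine", "ten", "eleven", "twelve", "thirteen",
--              "fourteen", "quarter", "sixteen", "seventeen", "eighteen",
--              "nineteen", "twenty"]
--
--     def spell(n):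
--         # compose "twenty x" on demand instead of precomputing a table
--         return words[n] if n <= 20 else "twenty " + words[n - 20]
--
--     if m == 0:
--         return spell(h) + " o' clock"
--     d = (m + 29) // 60                # 0 = 'past' side, 1 = 'to' side
--     mins = m + d * (60 - 2 * m)       # m, or 60 - m on the 'to' side
--     special = {30: "half", 15: "quarter", 1: "one minute"}
--     phrase = special.get(mins) or spell(mins) + " minutes"
--     return " ".join([phrase, ("past", "to")[d], spell(h + d)])
-- ===== Notes on version B (the rewrite author's own statement) =====
-- stated objective: alternative
-- what changed: Replaces A's precomputed 30-entry word table and seven sequential return branches by on-demand 'twenty x' word composition, a special-phrase dictionary lookup with an or-fallback, and a branch-free arithmetic computation of the past/to side ((m+29)//60) used to index a tuple and shift the hour, assembled by one join of tokens.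
-- intended difference: For m == 59, the only minute whose complementary count is one, A returns the ungrammatical plural 'one minutes to <h+1>' (its singular check covers only m == 1 on the past side) while B returns the intended singular 'one minute to <h+1>'. — e.g. on timeInWords(5, 59): A returns "one minutes to six", B returns "one minute to six"
-- outside the precondition, e.g. on timeInWords(0, -5): A returns 'twenty five minutes past zero', B returns 'sixteen minutes past zero'; on timeInWords(1, 70): A returns 'twenty minutes to two', B returns 'eleven minutes to two'
import Mathlib
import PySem

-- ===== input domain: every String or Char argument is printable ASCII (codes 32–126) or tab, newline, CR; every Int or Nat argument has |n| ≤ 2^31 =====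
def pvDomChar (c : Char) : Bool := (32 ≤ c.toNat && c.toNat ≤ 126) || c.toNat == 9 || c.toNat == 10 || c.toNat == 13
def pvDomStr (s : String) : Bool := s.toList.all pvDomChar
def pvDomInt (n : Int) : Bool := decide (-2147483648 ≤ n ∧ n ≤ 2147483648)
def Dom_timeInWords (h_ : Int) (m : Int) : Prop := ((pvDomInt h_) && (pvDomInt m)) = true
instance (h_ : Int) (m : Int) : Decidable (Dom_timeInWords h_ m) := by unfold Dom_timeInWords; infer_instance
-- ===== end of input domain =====

-- B replaces A's precomputed 30-entry table and seven sequential return branches by on-demand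
-- "twenty x" composition, a special-phrase dictionary with an or-fallback, and an arithmetically
-- computed past/to side ((m+29)//60) indexing a tuple and shifting the hour, joined from tokens
-- (objective: alternative); on m == 59 B intentionally returns the singular "one minute" (see D_).

-- ===== PORT A =====
def timeInWords (h_ : Int) (m : Int) : String :=
  let num : List String := ["zero", "one", "two", "three", "four", "five", "six", "seven",
    "eight", "nine", "ten", "eleven", "twelve", "thirteen", "fourteen", "quarter",
    "sixteen", "seventeen", "eighteen", "nineteen", "twenty"]
  let twenty : List String :=
    (PySem.List.pyRange 1 10 1).map (fun i => "twenty " ++ PySem.List.pyGetD num i "")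
  let num : List String := num ++ twenty
  if m == 0 then PySem.List.pyGetD num h_ "" ++ " o' clock"
  else if m == 1 then PySem.List.pyGetD num m "" ++ " minute past " ++ PySem.List.pyGetD num h_ ""
  else if m == 30 then "half past " ++ PySem.List.pyGetD num h_ ""
  else if m == 15 then "quarter past " ++ PySem.List.pyGetD num h_ ""
  else if m == 45 then "quarter to " ++ PySem.List.pyGetD num (h_ + 1) ""
  else if m < 30 then PySem.List.pyGetD num m "" ++ " minutes past " ++ PySem.List.pyGetD num h_ ""
  else if m > 30 then PySem.List.pyGetD num (60 - m) "" ++ " minutes to " ++ PySem.List.pyGetD num (h_ + 1) ""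
  else ""  -- unreachable for integer m (m = 30 was handled above); Python would return None here

-- ===== PORT B =====
def bWords : List String := ["zero", "one", "two", "three", "four", "five", "six", "seven",
  "eight", "nine", "ten", "eleven", "twelve", "thirteen", "fourteen", "quarter",
  "sixteen", "seventeen", "eighteen", "nineteen", "twenty"]

-- spell(n): words[n] if n <= 20 else "twenty " + words[n - 20]
-- pyGetD's default "" stands for IndexError; inside Pre_ the index is always in range
-- (0..20 on the first branch, 1..9 on the second), so it is never taken
def bSpell (n : Int) : String :=
  if n ≤ 20 then PySem.List.pyGetD bWords n ""
  else "twenty " ++ PySem.List.pyGetD bWords (n - 20) ""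

def timeInWords_alt (h_ : Int) (m : Int) : String :=
  if m == 0 then bSpell h_ ++ " o' clock"
  else
    let d := PySem.Int.floordiv (m + 29) 60     -- 0 = 'past' side, 1 = 'to' side
    let mins := m + d * (60 - 2 * m)
    let special : PySem.Dict Int String :=
      PySem.Dict.ofList [(30, "half"), (15, "quarter"), (1, "one minute")]
    -- special.get(mins) or spell(mins) + " minutes"  (exact: every dict value is truthy/nonempty)
    let phrase := match PySem.Dict.get? special mins with
      | some s => s
      | none => bSpell mins ++ " minutes"
    PySem.Str.join " " [phrase, PySem.List.pyGetD ["past", "to"] d "", bSpell (h_ + d)]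

-- ===== PRECONDITION & SPEC =====
-- Pre_ admits the inputs A's 30-entry word table genuinely covers (hour index 0..29, or
-- h_+1 ≤ 29 on the 'to' side, with clock minutes 0..59); outside it A either raises
-- IndexError or returns a word reached by Python negative-index wraparound, an accident
-- of its implementation, not a clock time.
def Pre_timeInWords (h_ : Int) (m : Int) : Prop :=
  0 ≤ h_ ∧ 0 ≤ m ∧ m ≤ 59 ∧ h_ ≤ 29 ∧ (30 < m → h_ ≤ 28)
instance (h_ : Int) (m : Int) : Decidable (Pre_timeInWords h_ m) := by unfold Pre_timeInWords; infer_instance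
def pvWitness_timeInWords : Int × Int := (3, 20)

-- On m == 59 — the only minute whose complementary count is one — A returns the ungrammatical
-- plural "one minutes to <h+1>" (its singular check covers only m == 1 on the 'past' side),
-- while B returns the intended singular "one minute to <h+1>".
def D_timeInWords (h_ : Int) (m : Int) : Prop := m = 59
instance (h_ : Int) (m : Int) : Decidable (D_timeInWords h_ m) := by unfold D_timeInWords; infer_instance

def Spec_timeInWords (h_ : Int) (m : Int) (out : String) : Prop := ¬ D_timeInWords h_ m → out = timeInWords_alt h_ m
instance (h_ : Int) (m : Int) (out : String) : Decidable (Spec_timeInWords h_ m out) := by unfold Spec_timeInWords; infer_instance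

def pvDiffWitness_timeInWords : Int × Int := (5, 59)
def pvDiffWitnessOut_timeInWords : String × String := ("one minutes to six", "one minute to six")

-- ===== CLAIM (what is proved, stated in full; the proofs are below) =====
def Claim_unchanged_timeInWords : Prop := ∀ (h_ : Int) (m : Int), Dom_timeInWords h_ m → Pre_timeInWords h_ m → Spec_timeInWords h_ m (timeInWords h_ m)
def Claim_changed_timeInWords : Prop := Dom_timeInWords (pvDiffWitness_timeInWords.1) (pvDiffWitness_timeInWords.2) ∧ Pre_timeInWords (pvDiffWitness_timeInWords.1) (pvDiffWitness_timeInWords.2) ∧ D_timeInWords (pvDiffWitness_timeInWords.1) (pvDiffWitness_timeInWords.2) ∧ timeInWords (pvDiffWitness_timeInWords.1) (pvDiffWitness_timeInWords.2) = pvDiffWitnessOut_timeInWords.1 ∧ timeInWords_alt (pvDiffWitness_timeInWords.1) (pvDiffWitness_timeInWords.2) = pvDiffWitnessOut_timeInWords.2 ∧ pvDiffWitnessOut_timeInWords.1 ≠ pvDiffWitnessOut_timeInWords.2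
def Claim_exact_timeInWords : Prop := ∀ (h_ : Int) (m : Int), Dom_timeInWords h_ m → Pre_timeInWords h_ m → D_timeInWords h_ m → timeInWords h_ m ≠ timeInWords_alt h_ m

-- ===== LEMMAS AND PROOFS =====
-- the fully evaluated word table A builds (base 21 words + the computed "twenty …" list)
def pvL : List String := ["zero", "one", "two", "three", "four", "five", "six", "seven",
  "eight", "nine", "ten", "eleven", "twelve", "thirteen", "fourteen", "quarter",
  "sixteen", "seventeen", "eighteen", "nineteen", "twenty",
  "twenty one", "twenty two", "twenty three", "twenty four", "twenty five",
  "twenty six", "twenty seven", "twenty eight", "twenty nine"]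

theorem aTable_eq : (["zero", "one", "two", "three", "four", "five", "six", "seven",
    "eight", "nine", "ten", "eleven", "twelve", "thirteen", "fourteen", "quarter",
    "sixteen", "seventeen", "eighteen", "nineteen", "twenty"] ++
    (PySem.List.pyRange 1 10 1).map (fun i => "twenty " ++ PySem.List.pyGetD
      ["zero", "one", "two", "three", "four", "five", "six", "seven",
       "eight", "nine", "ten", "eleven", "twelve", "thirteen", "fourteen", "quarter",
       "sixteen", "seventeen", "eighteen", "nineteen", "twenty"] i "")) = pvL := by decide

set_option maxRecDepth 10000 in
theorem spell_eq (n : Int) (h1 : 0 ≤ n) (h2 : n ≤ 29) :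
    bSpell n = PySem.List.pyGetD pvL n "" := by
  interval_cases n <;> decide

theorem join3_eq (p c w : String) :
    PySem.Str.join " " [p, c, w] = p ++ " " ++ c ++ " " ++ w := by
  rw [← String.toList_inj]
  simp [PySem.Str.join, PySem.Chars.join, List.intercalate, String.toList_append]

theorem eq_zero (h_ : Int) (hh1 : 0 ≤ h_) (hh2 : h_ ≤ 29) :
    timeInWords h_ 0 = timeInWords_alt h_ 0 := by
  simp only [timeInWords, timeInWords_alt, aTable_eq]
  rw [spell_eq h_ hh1 hh2]
  simp

theorem eq_past (h_ m : Int) (hh1 : 0 ≤ h_) (hh2 : h_ ≤ 29) (hm1 : 1 ≤ m) (hm2 : m ≤ 30) :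
    timeInWords h_ m = timeInWords_alt h_ m := by
  have hd : PySem.Int.floordiv (m + 29) 60 = 0 := by
    rw [PySem.Int.floordiv_eq_iff_of_pos (by omega)]; omega
  have hw := spell_eq h_ hh1 hh2
  have hit : (PySem.Dict.ofList [((30:Int), "half"), (15, "quarter"), (1, "one minute")]).items
      = [((30:Int), "half"), (15, "quarter"), (1, "one minute")] := by decide
  by_cases e1 : m = 1
  · subst e1
    simp only [timeInWords, timeInWords_alt, aTable_eq]
    norm_num [hd, hw, join3_eq, PySem.Dict.get?, hit, List.find?]
    rw [← String.toList_inj]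
    simp [String.toList_append]
    decide
  · by_cases e15 : m = 15
    · subst e15
      simp only [timeInWords, timeInWords_alt, aTable_eq]
      norm_num [hd, hw, join3_eq, PySem.Dict.get?, hit, List.find?]
      rw [← String.toList_inj]
      simp [String.toList_append]
      decide
    · by_cases e30 : m = 30
      · subst e30
        simp only [timeInWords, timeInWords_alt, aTable_eq]
        norm_num [hd, hw, join3_eq, PySem.Dict.get?, hit, List.find?]
        rw [← String.toList_inj]
        simp [String.toList_append]
        decide
      · have hmw := spell_eq m (by omega) (by omega)
        simp only [timeInWords, timeInWords_alt, aTable_eq]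
        norm_num [hw, hmw, join3_eq, PySem.Dict.get?, hit, List.find?, beq_iff_eq, hd,
          show (m + 29) / 60 = 0 from Int.ediv_eq_zero_of_lt (by omega) (by omega),
          show PySem.List.pyGetD ["past", "to"] (0:Int) "" = "past" from by decide,
          e1, e15, e30,
          show (((30:Int) == m)) = false from beq_eq_false_iff_ne.mpr (by omega),
          show (((15:Int) == m)) = false from beq_eq_false_iff_ne.mpr (by omega),
          show (((1:Int) == m)) = false from beq_eq_false_iff_ne.mpr (by omega),
          show m < 30 from by omega,
          show ¬(m = 45) from by omega, show ¬(m = 0) from by omega]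
        rw [← String.toList_inj]
        simp [String.toList_append]

theorem eq_to (h_ m : Int) (hh1 : 0 ≤ h_) (hh2 : h_ ≤ 28) (hm1 : 31 ≤ m) (hm2 : m ≤ 58) :
    timeInWords h_ m = timeInWords_alt h_ m := by
  have hd : PySem.Int.floordiv (m + 29) 60 = 1 := by
    rw [PySem.Int.floordiv_eq_iff_of_pos (by omega)]; omega
  have hw := spell_eq (h_ + 1) (by omega) (by omega)
  have hit : (PySem.Dict.ofList [((30:Int), "half"), (15, "quarter"), (1, "one minute")]).items
      = [((30:Int), "half"), (15, "quarter"), (1, "one minute")] := by decide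
  by_cases e45 : m = 45
  · subst e45
    simp only [timeInWords, timeInWords_alt, aTable_eq]
    norm_num [hd, hw, join3_eq, PySem.Dict.get?, hit, List.find?]
    rw [← String.toList_inj]
    simp [String.toList_append]
    decide
  · have hmw := spell_eq (60 - m) (by omega) (by omega)
    simp only [timeInWords, timeInWords_alt, aTable_eq]
    norm_num [hw, hmw, join3_eq, PySem.Dict.get?, hit, List.find?, beq_iff_eq, hd,
      show (m + 29) / 60 = 1 from by omega,
      show PySem.List.pyGetD ["past", "to"] (1:Int) "" = "to" from by decide,
      show ¬(m = 45) from e45, show ¬(m = 0) from by omega, show ¬(m = 1) from by omega,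
      show ¬(m = 30) from by omega, show ¬(m = 15) from by omega, show ¬(m < 30) from by omega,
      show (30:Int) < m from by omega,
      show m + (60 - 2 * m) = 60 - m from by ring,
      show (((30:Int) == 60 - m)) = false from beq_eq_false_iff_ne.mpr (by omega),
      show (((15:Int) == 60 - m)) = false from beq_eq_false_iff_ne.mpr (by omega),
      show (((1:Int) == 60 - m)) = false from beq_eq_false_iff_ne.mpr (by omega)]
    rw [← String.toList_inj]
    simp [String.toList_append]

theorem ne_59 (h_ : Int) (hh1 : 0 ≤ h_) (hh2 : h_ ≤ 28) :
    timeInWords h_ 59 ≠ timeInWords_alt h_ 59 := by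
  intro heq
  have hw := spell_eq (h_ + 1) (by omega) (by omega)
  have hit : (PySem.Dict.ofList [((30:Int), "half"), (15, "quarter"), (1, "one minute")]).items
      = [((30:Int), "half"), (15, "quarter"), (1, "one minute")] := by decide
  simp only [timeInWords, timeInWords_alt, aTable_eq] at heq
  norm_num [hw, join3_eq, PySem.Dict.get?, hit, List.find?,
    show PySem.List.pyGetD ["past", "to"] (1:Int) "" = "to" from by decide] at heq
  exact absurd heq (by decide)

-- ===== VERDICT (by name: the statement is the Claim_ definition above) =====
theorem timeInWords_spec : Claim_unchanged_timeInWords := by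
  intro h_ m _ hpre hnd
  obtain ⟨hh1, hm1, hm2, hh2, hb⟩ := hpre
  unfold D_timeInWords at hnd
  by_cases e0 : m = 0
  · subst e0; exact eq_zero h_ hh1 hh2
  · by_cases ep : m ≤ 30
    · exact eq_past h_ m hh1 hh2 (by omega) ep
    · exact eq_to h_ m hh1 (hb (by omega)) (by omega) (by omega)

set_option maxRecDepth 10000 in
theorem timeInWords_changed : Claim_changed_timeInWords := by
  unfold Claim_changed_timeInWords; decide

theorem timeInWords_tight : Claim_exact_timeInWords := by
  intro h_ m _ hpre hd
  obtain ⟨hh1, hm1, hm2, hh2, hb⟩ := hpre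
  unfold D_timeInWords at hd
  subst hd
  exact ne_59 h_ hh1 (hb (by omega))
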